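-- pv_equiv track=rewrite | github.com/felipeforte/processador_sql | classes/sqlparser.py | _quebrar_and
-- ===== SOURCE A (Python) =====
-- def _quebrar_and(condicao: str) -> list:
--     """Quebra uma condição com AND em partes, respeitando parênteses."""
--     partes = []
--     nivel = 0
--     inicio = 0
--     for i, ch in enumerate(condicao):
--         if ch == '(':
--             nivel += 1
--         elif ch == ')':
--             nivel -= 1
--         elif nivel == 0 and condicao[i:i+3].upper() == 'AND':
--             partes.append(condicao[inicio:i].strip())
--             inicio = i + 3
--     partes.append(condicao[inicio:].strip())
--     return partes
-- ===== SOURCE B (Python) =====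
-- def _corte_topo(condicao: str):
--     """Indice do primeiro 'AND' fora de parenteses, ou None."""
--     nivel = 0
--     for i, ch in enumerate(condicao):
--         if ch == '(':
--             nivel += 1
--         elif ch == ')':
--             nivel -= 1
--         elif nivel == 0 and condicao[i:i+3].upper() == 'AND':
--             return i
--     return None
--
--
-- def _quebrar_and(condicao: str) -> list:
--     """Quebra uma condição com AND em partes, respeitando parênteses.
--
--     Recursive decomposition: find the first top-level AND, split the
--     string there, and recurse on the remainder."""
--     corte = _corte_topo(condicao)
--     if corte is None:
--         return [condicao.strip()]
--     return [condicao[:corte].strip()] + _quebrar_and(condicao[corte + 3:])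
-- ===== Notes on version B (the rewrite author's own statement) =====
-- stated objective: alternative
-- what changed: Replaced A's single-pass fold that threads (partes, nivel, inicio) state across the whole string by a recursive decomposition: a helper finds the index of the first top-level AND and the function slices the string there and recurses on the remainder.
import Mathlib
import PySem

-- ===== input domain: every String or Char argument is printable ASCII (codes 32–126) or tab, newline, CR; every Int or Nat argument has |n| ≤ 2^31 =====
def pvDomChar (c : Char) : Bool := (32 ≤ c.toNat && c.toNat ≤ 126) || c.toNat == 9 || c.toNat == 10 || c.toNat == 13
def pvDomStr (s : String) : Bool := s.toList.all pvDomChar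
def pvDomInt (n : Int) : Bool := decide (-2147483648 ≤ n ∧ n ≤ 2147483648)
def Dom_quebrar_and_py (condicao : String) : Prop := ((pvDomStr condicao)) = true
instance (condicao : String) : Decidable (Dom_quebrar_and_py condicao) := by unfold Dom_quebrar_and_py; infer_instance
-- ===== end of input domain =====

-- B replaces A's one-pass fold (parts/level/start-index state) by a recursive decomposition:
-- find the first top-level AND, cut there, recurse on the tail; same return value (alternative decomposition, no speed claim).

-- ===== PORT A =====
-- A's loop body: state (partes, nivel, inicio), one enumerate step (i, ch)
def pvStepA (cs : List Char) (st : List String × Int × Int) (p : Int × Char) :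
    List String × Int × Int :=
  let partes := st.1
  let nivel := st.2.1
  let inicio := st.2.2
  if p.2 = '(' then (partes, nivel + 1, inicio)
  else if p.2 = ')' then (partes, nivel - 1, inicio)
  else if nivel = 0 ∧
      PySem.Chars.upper (PySem.Chars.slice cs (some p.1) (some (p.1 + 3))) = ['A', 'N', 'D'] then
    (partes ++ [String.ofList (PySem.Chars.strip (PySem.Chars.slice cs (some inicio) (some p.1)))],
      nivel, p.1 + 3)
  else (partes, nivel, inicio)

def quebrar_and_py (condicao : String) : List String :=
  let cs := condicao.toList
  let st := (PySem.List.enumerate cs).foldl (pvStepA cs) ([], 0, 0)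
  st.1 ++ [String.ofList (PySem.Chars.strip (PySem.Chars.slice cs (some st.2.2) none))]

-- ===== PORT B =====
-- B's helper loop (_corte_topo): for i, ch in enumerate(condicao), early return
def pvCorteGo (cs : List Char) (nivel : Int) (rest : List Char) (i : Int) : Option Int :=
  match rest with
  | [] => none
  | c :: t =>
    if c = '(' then pvCorteGo cs (nivel + 1) t (i + 1)
    else if c = ')' then pvCorteGo cs (nivel - 1) t (i + 1)
    else if nivel = 0 ∧
        PySem.Chars.upper (PySem.Chars.slice cs (some i) (some (i + 3))) = ['A', 'N', 'D'] then
      some i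
    else pvCorteGo cs nivel t (i + 1)

-- facts the recursion in B's port needs for termination (cited by decreasing_by)
theorem pvCorteGo_ne_nil {cs : List Char} {nivel : Int} {rest : List Char} {i k : Int}
    (h : pvCorteGo cs nivel rest i = some k) : rest ≠ [] := by
  intro e; subst e; simp [pvCorteGo] at h

theorem pvCorteGo_le {cs : List Char} {nivel : Int} {rest : List Char} {i k : Int}
    (h : pvCorteGo cs nivel rest i = some k) : i ≤ k := by
  induction rest generalizing nivel i with
  | nil => simp [pvCorteGo] at h
  | cons c t ih =>
    simp only [pvCorteGo] at h
    split_ifs at h with h1 h2 h3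
    · exact le_trans (by omega) (ih h)
    · exact le_trans (by omega) (ih h)
    · cases h; omega
    · exact le_trans (by omega) (ih h)

def pvAltCore (cs : List Char) : List String :=
  match h : pvCorteGo cs 0 cs 0 with
  | none => [String.ofList (PySem.Chars.strip cs)]
  | some k =>
    String.ofList (PySem.Chars.strip (PySem.Chars.slice cs none (some k))) ::
      pvAltCore (PySem.Chars.slice cs (some (k + 3)) none)
termination_by cs.length
decreasing_by
  have hk : (0:Int) ≤ k := pvCorteGo_le h
  have hne : cs ≠ [] := pvCorteGo_ne_nil h
  rw [PySem.Chars.slice_eq_listSlice, PySem.List.slice_from cs (by omega : (0:Int) ≤ k + 3)]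
  have : 1 ≤ cs.length := List.length_pos_iff.mpr hne
  have h3 : 3 ≤ (k + 3).toNat := by omega
  simp only [List.length_drop]
  omega

def quebrar_and_py_alt (condicao : String) : List String :=
  pvAltCore condicao.toList

-- ===== PRECONDITION & SPEC =====
def Spec_quebrar_and_py (condicao : String) (out : List String) : Prop := out = quebrar_and_py_alt condicao
instance (condicao : String) (out : List String) : Decidable (Spec_quebrar_and_py condicao out) := by unfold Spec_quebrar_and_py; infer_instance

-- ===== CLAIM (what is proved, stated in full; the proofs are below) =====
def Claim_equal_quebrar_and_py : Prop := ∀ (condicao : String), Dom_quebrar_and_py condicao → Spec_quebrar_and_py condicao (quebrar_and_py condicao)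

-- ===== LEMMAS AND PROOFS =====

-- the 3-char window at absolute index j+i in cs is the window at i in cs.drop j
theorem pv_slice3_shift (cs : List Char) (j i : Nat) :
    PySem.Chars.slice cs (some ((j : Int) + (i : Int))) (some ((j : Int) + (i : Int) + 3)) =
    PySem.Chars.slice (cs.drop j) (some (i : Int)) (some ((i : Int) + 3)) := by
  simp only [PySem.Chars.slice_eq_listSlice]
  rw [PySem.List.slice_toNat cs (by omega) (by omega),
      PySem.List.slice_toNat (cs.drop j) (by omega) (by omega)]
  rw [List.drop_drop]
  congr 1
  omega

-- B's scan over cs.drop j, shifted by j, is B's scan over cs at absolute indices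
theorem pv_corteGo_shift (cs : List Char) (j : Nat) : ∀ (rest : List Char) (nivel : Int) (i : Nat),
    pvCorteGo cs nivel rest ((j : Int) + (i : Int)) =
    (pvCorteGo (cs.drop j) nivel rest (i : Int)).map (fun k => k + (j : Int)) := by
  intro rest
  induction rest with
  | nil => intro nivel i; simp [pvCorteGo]
  | cons c t ih =>
    intro nivel i
    simp only [pvCorteGo, pv_slice3_shift cs j i]
    have e1 : (j : Int) + (i : Int) + 1 = (j : Int) + ((i + 1 : Nat) : Int) := by push_cast; ring
    split_ifs with h1 h2 h3
    · rw [e1, ih]; push_cast; ring_nf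
    · rw [e1, ih]; push_cast; ring_nf
    · simp [add_comm]
    · rw [e1, ih]; push_cast; ring_nf

-- if B's scan finds no cut, A's fold only updates nivel
theorem pv_foldA_none (cs : List Char) : ∀ (rest : List Char) (nivel i : Int)
    (partes : List String) (inicio : Int),
    pvCorteGo cs nivel rest i = none →
    ∃ nv, (PySem.List.enumerate rest i).foldl (pvStepA cs) (partes, nivel, inicio) =
      (partes, nv, inicio) := by
  intro rest
  induction rest with
  | nil => intro nivel i partes inicio _; exact ⟨nivel, by simp [PySem.List.enumerate]⟩
  | cons c t ih =>
    intro nivel i partes inicio h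
    rw [PySem.List.enumerate_cons]
    simp only [pvCorteGo] at h
    simp only [List.foldl_cons, pvStepA]
    split_ifs at h ⊢ with h1 h2 h3
    · exact ih _ _ _ _ h
    · exact ih _ _ _ _ h
    · exact ih _ _ _ _ h

-- shape of a matched window: three chars whose upper-cases are A, N, D
theorem pv_and_shape {cs : List Char} {i : Int} (hi : 0 ≤ i)
    (h : PySem.Chars.upper (PySem.Chars.slice cs (some i) (some (i + 3))) = ['A', 'N', 'D']) :
    ∃ a b c r, cs.drop i.toNat = a :: b :: c :: r ∧
      PySem.Chars.upperChar a = 'A' ∧ PySem.Chars.upperChar b = 'N' ∧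
      PySem.Chars.upperChar c = 'D' := by
  rw [PySem.Chars.slice_eq_listSlice, PySem.List.slice_toNat cs hi (by omega)] at h
  have h3 : (i + 3).toNat - i.toNat = 3 := by omega
  rw [h3] at h
  rcases e : cs.drop i.toNat with _ | ⟨a, _ | ⟨b, _ | ⟨c, r⟩⟩⟩ <;>
    (rw [e] at h; simp [PySem.Chars.upper] at h)
  exact ⟨a, b, c, r, rfl, h.1, h.2.1, h.2.2⟩

-- a step on a char whose upper-case is not 'A' (and not a paren) leaves the state alone
theorem pv_step_noop {cs : List Char} {b : Char} {i : Int} {r : List Char}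
    (hi : 0 ≤ i) (hr : cs.drop i.toNat = b :: r) (hb : PySem.Chars.upperChar b ≠ 'A')
    (hbp : b ≠ '(') (hbq : b ≠ ')') (st : List String × Int × Int) :
    pvStepA cs st (i, b) = st := by
  have hs : PySem.Chars.upper (PySem.Chars.slice cs (some i) (some (i + 3))) ≠ ['A', 'N', 'D'] := by
    rw [PySem.Chars.slice_eq_listSlice, PySem.List.slice_toNat cs hi (by omega)]
    have h3 : (i + 3).toNat - i.toNat = 3 := by omega
    rw [h3, hr]
    intro hcon
    simp [PySem.Chars.upper] at hcon
    exact hb hcon.1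
  rw [PySem.Chars.slice_eq_listSlice] at hs
  simp only [pvStepA, hbp, hbq, if_false]
  rw [if_neg (fun hc => hs hc.2)]

-- the char b cannot be a paren when its upper-case is a letter
theorem pv_upper_ne_paren {b : Char} {L : Char} (hL : PySem.Chars.upperChar b = L)
    (h1 : PySem.Chars.upperChar '(' ≠ L) (h2 : PySem.Chars.upperChar ')' ≠ L) :
    b ≠ '(' ∧ b ≠ ')' := by
  constructor <;> intro e <;> subst e
  · exact h1 hL
  · exact h2 hL

-- if B's scan of cs.drop j finds no cut, A's fold from j changes nothing but nivel
theorem pv_master_none (cs : List Char) (j : Nat) (partes : List String)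
    (h : pvCorteGo (cs.drop j) 0 (cs.drop j) 0 = none) :
    (let st := (PySem.List.enumerate (cs.drop j) (j : Int)).foldl (pvStepA cs) (partes, 0, (j : Int));
     st.1 ++ [String.ofList (PySem.Chars.strip (PySem.Chars.slice cs (some st.2.2) none))]) =
    partes ++ pvAltCore (cs.drop j) := by
  have hshift := pv_corteGo_shift cs j (cs.drop j) 0 0
  simp only [Nat.cast_zero, add_zero] at hshift
  rw [h] at hshift
  simp only [Option.map_none] at hshift
  obtain ⟨nv, hfold⟩ := pv_foldA_none cs (cs.drop j) 0 (j : Int) partes (j : Int) hshift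
  dsimp only
  rw [hfold]
  conv_rhs => rw [pvAltCore.eq_def]
  split
  · next heq =>
    have hsl : PySem.Chars.slice cs (some (j : Int)) none = cs.drop j := by
      rw [PySem.Chars.slice_eq_listSlice, PySem.List.slice_from _ (by omega : (0 : Int) ≤ (j : Int)),
        Int.toNat_natCast]
    rw [hsl]
  · next k1 heq => rw [h] at heq; cases heq

-- if B's scan finds the cut k, A's fold performs exactly that cut and continues at k+3
theorem pv_foldA_cut (cs : List Char) : ∀ (rest : List Char) (nivel : Int) (i : Nat) (k : Int)
    (partes : List String) (inicio : Int),
    rest = cs.drop i →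
    pvCorteGo cs nivel rest (i : Int) = some k →
    (PySem.List.enumerate rest (i : Int)).foldl (pvStepA cs) (partes, nivel, inicio) =
    (PySem.List.enumerate (cs.drop (k.toNat + 3)) (k + 3)).foldl (pvStepA cs)
      (partes ++ [String.ofList (PySem.Chars.strip
        (PySem.Chars.slice cs (some inicio) (some k)))], 0, k + 3) := by
  intro rest
  induction rest with
  | nil => intro nivel i k partes inicio _ h; simp [pvCorteGo] at h
  | cons c t ih =>
    intro nivel i k partes inicio hrest h
    have ht : t = cs.drop (i + 1) := by
      have := congrArg List.tail hrest; simpa [List.tail_drop] using this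
    have ei : ((i + 1 : Nat) : Int) = (i : Int) + 1 := by push_cast; ring
    rw [PySem.List.enumerate_cons]
    simp only [pvCorteGo] at h
    simp only [List.foldl_cons]
    split_ifs at h with h1 h2 h3
    · rw [show pvStepA cs (partes, nivel, inicio) ((i : Int), c) = (partes, nivel + 1, inicio) by
        simp [pvStepA, h1]]
      rw [← ei]; exact ih _ _ _ _ _ ht (by rw [ei]; exact h)
    · rw [show pvStepA cs (partes, nivel, inicio) ((i : Int), c) = (partes, nivel - 1, inicio) by
        simp [pvStepA, h2]]
      rw [← ei]; exact ih _ _ _ _ _ ht (by rw [ei]; exact h)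
    · -- the cut: k = i
      cases h
      obtain ⟨a, b, c', r, hdrop, hA, hN, hD⟩ := pv_and_shape (by positivity) h3.2
      rw [Int.toNat_natCast] at hdrop
      have hct : c :: t = a :: b :: c' :: r := by rw [hrest, hdrop]
      obtain ⟨rfl, rfl⟩ : c = a ∧ t = b :: c' :: r := by
        constructor <;> [exact (List.cons.injEq _ _ _ _ ▸ hct).1; exact (List.cons.injEq _ _ _ _ ▸ hct).2]
      rw [show pvStepA cs (partes, nivel, inicio) ((i : Int), c) =
          (partes ++ [String.ofList (PySem.Chars.strip
            (PySem.Chars.slice cs (some inicio) (some (i : Int))))], nivel, (i : Int) + 3) by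
        have hnp := pv_upper_ne_paren hA (by decide) (by decide)
        have h32 := h3.2
        rw [PySem.Chars.slice_eq_listSlice] at h32
        simp [pvStepA, hnp.1, hnp.2, h3.1, h32, PySem.Chars.slice_eq_listSlice]]
      rw [PySem.List.enumerate_cons, PySem.List.enumerate_cons]
      simp only [List.foldl_cons]
      have hd1 : cs.drop ((i : Int) + 1).toNat = b :: c' :: r := by
        have h1n : ((i : Int) + 1).toNat = i + 1 := by omega
        rw [h1n, ← List.tail_drop, hdrop]; rfl
      have hd2 : cs.drop ((i : Int) + 1 + 1).toNat = c' :: r := by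
        have h2n : ((i : Int) + 1 + 1).toNat = i + 2 := by omega
        rw [h2n, show i + 2 = (i + 1) + 1 from rfl, ← List.tail_drop, ← List.tail_drop, hdrop]; rfl
      have hnb := pv_upper_ne_paren hN (by decide) (by decide)
      have hnc := pv_upper_ne_paren hD (by decide) (by decide)
      rw [pv_step_noop (by omega) hd1 (by rw [hN]; decide) hnb.1 hnb.2]
      rw [pv_step_noop (by omega) hd2 (by rw [hD]; decide) hnc.1 hnc.2]
      have hdr : cs.drop ((i : Int).toNat + 3) = r := by
        rw [Int.toNat_natCast, ← List.drop_drop, hdrop]; rfl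
      rw [hdr, h3.1, show (i : Int) + 1 + 1 + 1 = (i : Int) + 3 from by ring]
    · rw [show pvStepA cs (partes, nivel, inicio) ((i : Int), c) = (partes, nivel, inicio) by
        simp only [pvStepA, h1, h2, if_false]
        rw [if_neg (by rw [PySem.Chars.slice_eq_listSlice] at h3; exact h3)]]
      rw [← ei]; exact ih _ _ _ _ _ ht (by rw [ei]; exact h)

-- master induction: A's fold from position j with a clean state produces partes ++ pvAltCore (cs.drop j)
theorem pv_master : ∀ (n : Nat) (cs : List Char) (j : Nat) (partes : List String),
    cs.length - j ≤ n →
    (let st := (PySem.List.enumerate (cs.drop j) (j : Int)).foldl (pvStepA cs) (partes, 0, (j : Int));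
     st.1 ++ [String.ofList (PySem.Chars.strip (PySem.Chars.slice cs (some st.2.2) none))]) =
    partes ++ pvAltCore (cs.drop j) := by
  intro n
  induction n with
  | zero =>
    intro cs j partes hn
    have hdz : cs.drop j = [] := by
      rw [List.drop_eq_nil_iff]; omega
    exact pv_master_none cs j partes (by rw [hdz]; simp [pvCorteGo])
  | succ n ih =>
    intro cs j partes hn
    cases h : pvCorteGo (cs.drop j) 0 (cs.drop j) 0 with
    | none => exact pv_master_none cs j partes h
    | some k0 =>
      have hk0 : (0 : Int) ≤ k0 := pvCorteGo_le h
      have hne : cs.drop j ≠ [] := pvCorteGo_ne_nil h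
      have hjlen : j < cs.length := by
        by_contra hc
        exact hne (by rw [List.drop_eq_nil_iff]; omega)
      have hshift := pv_corteGo_shift cs j (cs.drop j) 0 0
      simp only [Nat.cast_zero, add_zero] at hshift
      rw [h] at hshift
      simp only [Option.map_some] at hshift
      have hcut := pv_foldA_cut cs (cs.drop j) 0 j (k0 + (j : Int)) partes (j : Int) rfl hshift
      dsimp only
      rw [hcut]
      have ej' : (((k0 + (j : Int)).toNat + 3 : Nat) : Int) = k0 + (j : Int) + 3 := by omega
      have hmain := ih cs ((k0 + (j : Int)).toNat + 3) (partes ++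
        [String.ofList (PySem.Chars.strip (PySem.Chars.slice cs (some (j : Int))
          (some (k0 + (j : Int)))))]) (by omega)
      rw [ej'] at hmain
      dsimp only at hmain
      rw [hmain]
      -- unfold pvAltCore at cs.drop j on the some branch
      conv_rhs => rw [pvAltCore.eq_def]
      split
      · next heq => rw [h] at heq; cases heq
      · next k1 heq =>
        rw [h] at heq
        cases heq
        -- identify the head part and the tail list
        have hhead : PySem.Chars.slice cs (some (j : Int)) (some (k0 + (j : Int))) =
            PySem.Chars.slice (cs.drop j) none (some k0) := by
          simp only [PySem.Chars.slice_eq_listSlice]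
          rw [PySem.List.slice_toNat cs (by omega) (by omega), PySem.List.slice_to _ hk0]
          rw [show ((k0 + (j : Int)).toNat - (j : Int).toNat) = k0.toNat from by omega,
            Int.toNat_natCast]
        have htail : cs.drop ((k0 + (j : Int)).toNat + 3) =
            PySem.Chars.slice (cs.drop j) (some (k0 + 3)) none := by
          simp only [PySem.Chars.slice_eq_listSlice]
          rw [PySem.List.slice_from _ (by omega : (0 : Int) ≤ k0 + 3)]
          rw [List.drop_drop]
          congr 1
          omega
        rw [hhead, htail]
        simp

-- ===== VERDICT (by name: the statement is the Claim_ definition above) =====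
theorem quebrar_and_py_spec : Claim_equal_quebrar_and_py := by
  intro condicao _
  unfold Spec_quebrar_and_py quebrar_and_py quebrar_and_py_alt
  have hm := pv_master condicao.toList.length condicao.toList 0 [] (by omega)
  simpa using hm
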